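-- pv_equiv track=rewrite | github.com/FXJEFE-Kali/FXJEFE_LARRYAGENT_ALIGNED333 | production_rag.py | _chunk_csv
-- ===== SOURCE A (Python) =====
-- from typing import List, Dict, Optional, Tuple
--
-- def _chunk_csv(text: str, rows_per_chunk: int = 50) -> List[str]:
--     """Chunk CSV preserving header"""
--     lines = text.split('\n')
--     if not lines:
--         return []
--
--     header = lines[0]
--     chunks = []
--
--     for i in range(1, len(lines), rows_per_chunk):
--         chunk_lines = [header] + lines[i:i + rows_per_chunk]
--         chunk_text = '\n'.join(chunk_lines)
--         if chunk_text.strip():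
--             chunks.append(chunk_text)
--
--     return chunks if chunks else [text]
-- ===== SOURCE B (Python) =====
-- def _chunk_csv(text: str, rows_per_chunk: int = 50) -> list:
--     """Chunk CSV preserving header (streaming single pass with an explicit buffer)."""
--     lines = text.split('\n')
--     header = lines[0]
--     if rows_per_chunk <= 0:
--         return [text]
--
--     def flush(chunks, buf):
--         chunk = '\n'.join([header] + buf)
--         if chunk.strip():
--             chunks.append(chunk)
--         return chunks
--
--     chunks = []
--     buf = []
--     for line in lines[1:]:
--         buf.append(line)
--         if len(buf) == rows_per_chunk:
--             chunks = flush(chunks, buf)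
--             buf = []
--     if buf:
--         chunks = flush(chunks, buf)
--     return chunks if chunks else [text]
-- ===== Notes on version B (the rewrite author's own statement) =====
-- stated objective: alternative
-- what changed: Replaced A's index loop over range(1, len, step) with per-iteration list slicing by a single streaming pass over lines[1:] that maintains an explicit row buffer and flushes a header-prefixed chunk whenever the buffer fills (and once at the end).
import Mathlib
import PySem

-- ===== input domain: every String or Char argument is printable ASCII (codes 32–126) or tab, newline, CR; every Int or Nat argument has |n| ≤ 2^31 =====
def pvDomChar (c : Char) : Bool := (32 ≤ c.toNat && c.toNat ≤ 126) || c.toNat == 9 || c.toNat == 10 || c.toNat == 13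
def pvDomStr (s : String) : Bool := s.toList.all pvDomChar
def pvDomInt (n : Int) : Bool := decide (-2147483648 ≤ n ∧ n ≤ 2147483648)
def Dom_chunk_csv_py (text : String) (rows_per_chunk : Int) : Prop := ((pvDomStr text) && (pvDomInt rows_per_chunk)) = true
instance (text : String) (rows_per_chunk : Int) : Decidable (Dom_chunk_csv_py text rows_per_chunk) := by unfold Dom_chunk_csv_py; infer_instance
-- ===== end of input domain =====

-- B replaces A's index/slice loop over ranges by a single streaming pass with an explicit
-- row buffer and counter (objective: alternative decomposition; same cost).

-- ===== PORT A =====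
def chunk_csv_py (text : String) (rows_per_chunk : Int) : List String :=
  let lines := (PySem.Str.split? text "\n").getD []   -- sep "\n" ≠ "" so split? never raises
  if lines.isEmpty then []
  else
    let header := lines.headD ""                      -- lines[0] under the nonempty guard
    let chunks := (PySem.List.pyRange 1 (lines.length : Int) rows_per_chunk).foldl
      (fun chunks i =>
        let chunk_lines := header :: PySem.List.slice lines (some i) (some (i + rows_per_chunk))
        let chunk_text := PySem.Str.join "\n" chunk_lines
        if PySem.Str.strip chunk_text ≠ "" then chunks ++ [chunk_text] else chunks)
      []
    if chunks.isEmpty then [text] else chunks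

-- ===== PORT B =====
def chunk_csv_py_alt (text : String) (rows_per_chunk : Int) : List String :=
  let lines := (PySem.Str.split? text "\n").getD []
  let header := lines.headD ""
  if rows_per_chunk ≤ 0 then [text]
  else
    let flush := fun (chunks buf : List String) =>
      let chunk := PySem.Str.join "\n" (header :: buf)
      if PySem.Str.strip chunk ≠ "" then chunks ++ [chunk] else chunks
    let st := lines.tail.foldl
      (fun (st : List String × List String) line =>
        let buf := st.2 ++ [line]
        if (buf.length : Int) = rows_per_chunk then (flush st.1 buf, []) else (st.1, buf))
      ([], [])
    let chunks := if st.2.isEmpty then st.1 else flush st.1 st.2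
    if chunks.isEmpty then [text] else chunks

-- ===== PRECONDITION & SPEC =====
-- Pre_ excludes only rows_per_chunk = 0, where Python's range(…, 0) raises ValueError.
def Pre_chunk_csv_py (text : String) (rows_per_chunk : Int) : Prop := rows_per_chunk ≠ 0
instance (text : String) (rows_per_chunk : Int) : Decidable (Pre_chunk_csv_py text rows_per_chunk) := by unfold Pre_chunk_csv_py; infer_instance
def pvWitness_chunk_csv_py : String × Int := ("id,v\n1,a\n2,b\n3,c", 2)

def Spec_chunk_csv_py (text : String) (rows_per_chunk : Int) (out : List String) : Prop := out = chunk_csv_py_alt text rows_per_chunk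
instance (text : String) (rows_per_chunk : Int) (out : List String) : Decidable (Spec_chunk_csv_py text rows_per_chunk out) := by unfold Spec_chunk_csv_py; infer_instance

-- ===== CLAIM (what is proved, stated in full; the proofs are below) =====
def Claim_equal_chunk_csv_py : Prop := ∀ (text : String) (rows_per_chunk : Int), Dom_chunk_csv_py text rows_per_chunk → Pre_chunk_csv_py text rows_per_chunk → Spec_chunk_csv_py text rows_per_chunk (chunk_csv_py text rows_per_chunk)

-- ===== LEMMAS AND PROOFS =====

-- split('\n') never returns an empty list
theorem pvGo_ne_nil (sep : List Char) : ∀ (fuel : Nat) (l cur : List Char) (acc : List (List Char)),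
    PySem.Chars.splitOn.go sep fuel l cur acc ≠ [] := by
  intro fuel
  induction fuel with
  | zero => intro l cur acc; simp [PySem.Chars.splitOn.go]
  | succ n ih =>
    intro l cur acc
    cases l with
    | nil => simp [PySem.Chars.splitOn.go]
    | cons c rest =>
      rw [PySem.Chars.splitOn.go]
      split <;> apply ih

theorem pvSplit_ne_nil (t : String) : (PySem.Str.split? t "\n").getD [] ≠ [] := by
  simp [PySem.Str.split?, PySem.Chars.split?, PySem.Chars.splitOn]
  intro h
  exact pvGo_ne_nil _ _ _ _ _ h

-- a positive-step pyRange is empty / a cons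
theorem pvPyRange_pos_nil (a b s : Int) (hs : 0 < s) (h : b ≤ a) :
    PySem.List.pyRange a b s = [] := by
  rw [PySem.List.pyRange_of_pos a b hs]
  simp [show ¬ a < b by omega]

theorem pvPyRange_pos_cons (a b s : Int) (hs : 0 < s) (h : a < b) :
    PySem.List.pyRange a b s = a :: PySem.List.pyRange (a + s) b s := by
  rw [PySem.List.pyRange_of_pos a b hs, PySem.List.pyRange_of_pos (a + s) b hs]
  have hne : s ≠ 0 := by omega
  have h1 : b - a + s - 1 = (b - a - 1) + 1 * s := by ring
  have h2 : (b - a + s - 1) / s = (b - a - 1) / s + 1 := by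
    rw [h1, Int.add_mul_ediv_right _ _ hne]
  have hq : 0 ≤ (b - a - 1) / s := Int.ediv_nonneg (by omega) (by omega)
  have hcount : ((b - a + s - 1) / s).toNat = ((b - a - 1) / s).toNat + 1 := by omega
  by_cases h3 : a + s < b
  · simp only [if_pos h, if_pos h3, show b - (a + s) + s - 1 = b - a - 1 by ring, hcount,
      List.range_succ_eq_map, List.map_cons, List.map_map]
    refine List.cons_eq_cons.mpr ⟨by simp, ?_⟩
    apply List.map_congr_left
    intro k _
    simp only [Function.comp, Nat.succ_eq_add_one]
    push_cast
    ring
  · have hz : (b - a - 1) / s = 0 := Int.ediv_eq_zero_of_lt (by omega) (by omega)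
    simp only [if_pos h, if_neg h3, hcount, hz]
    simp

-- reference chunker: consecutive blocks of r+1 rows
def pvBlocks (r : Nat) (xs : List String) : List (List String) :=
  if h : xs = [] then [] else xs.take (r + 1) :: pvBlocks r (xs.drop (r + 1))
termination_by xs.length
decreasing_by
  simp only [List.length_drop]
  cases xs with
  | nil => exact absurd rfl h
  | cons y ys => simp

theorem pvBlocks_nil (r : Nat) : pvBlocks r [] = [] := by rw [pvBlocks]; simp

theorem pvBlocks_cons (r : Nat) (xs : List String) (h : xs ≠ []) :
    pvBlocks r xs = xs.take (r + 1) :: pvBlocks r (xs.drop (r + 1)) := by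
  rw [pvBlocks]; simp [h]

-- A's fold over pyRange with slices = folding the emitter over the blocks
theorem pvFoldA (s : Int) (hs : 0 < s) (f : List String → List String → List String)
    (lines : List String) :
    ∀ (m : Nat) (a : Int) (acc : List String), 0 ≤ a → lines.length - a.toNat ≤ m →
    (PySem.List.pyRange a (lines.length : Int) s).foldl
        (fun acc i => f acc (PySem.List.slice lines (some i) (some (i + s)))) acc
      = (pvBlocks (s.toNat - 1) (lines.drop a.toNat)).foldl f acc := by
  intro m
  induction m with
  | zero =>
    intro a acc ha hm
    have hge : (lines.length : Int) ≤ a := by omega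
    rw [pvPyRange_pos_nil _ _ _ hs hge, List.drop_eq_nil_of_le (by omega), pvBlocks_nil]
    rfl
  | succ n ih =>
    intro a acc ha hm
    by_cases hlt : a < (lines.length : Int)
    · rw [pvPyRange_pos_cons _ _ _ hs hlt]
      have hdne : lines.drop a.toNat ≠ [] := by
        intro h
        have := congrArg List.length h
        simp at this
        omega
      rw [pvBlocks_cons _ _ hdne]
      have hr1 : s.toNat - 1 + 1 = s.toNat := by omega
      rw [List.foldl_cons, List.foldl_cons,
        PySem.List.slice_toNat lines ha (by omega),
        show (a + s).toNat - a.toNat = s.toNat by omega, hr1]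
      have hdrop : lines.drop ((a + s).toNat) = (lines.drop a.toNat).drop s.toNat := by
        rw [List.drop_drop]; congr 1; omega
      rw [← hdrop] at *
      exact ih (a + s) _ (by omega) (by simp; omega)
    · rw [pvPyRange_pos_nil _ _ _ hs (by omega), List.drop_eq_nil_of_le (by omega), pvBlocks_nil]
      rfl

-- B's streaming pass, fused with its final flush, as a structural recursion
def pvStream (R : Nat) (emit : List String → List String → List String)
    (acc buf rows : List String) : List String :=
  match rows with
  | [] => if buf.isEmpty then acc else emit acc buf
  | l :: rest =>
    if buf.length + 1 = R then pvStream R emit (emit acc (buf ++ [l])) [] rest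
    else pvStream R emit acc (buf ++ [l]) rest

theorem pvFoldB (s : Int) (emit : List String → List String → List String) :
    ∀ (rows acc buf : List String),
    (let st := rows.foldl
        (fun (st : List String × List String) line =>
          let buf := st.2 ++ [line]
          if (buf.length : Int) = s then (emit st.1 buf, []) else (st.1, buf))
        (acc, buf);
     if st.2.isEmpty then st.1 else emit st.1 st.2)
      = pvStream s.toNat emit acc buf rows := by
  intro rows
  induction rows with
  | nil => intro acc buf; cases buf <;> simp [pvStream]
  | cons l rest ih =>
    intro acc buf
    simp only [List.foldl_cons, pvStream]
    by_cases h : ((buf ++ [l]).length : Int) = s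
    · have hn : buf.length + 1 = s.toNat := by simp at h; omega
      rw [if_pos h, if_pos hn]
      exact ih (emit acc (buf ++ [l])) []
    · have hn : ¬ buf.length + 1 = s.toNat := by
        intro hc
        apply h
        simp
        omega
      rw [if_neg h, if_neg hn]
      exact ih acc (buf ++ [l])

theorem pvStream_step (R : Nat) (emit : List String → List String → List String) :
    ∀ (rows buf acc : List String), buf.length < R →
    pvStream R emit acc buf rows =
      if buf.length + rows.length < R then
        (if (buf ++ rows).isEmpty then acc else emit acc (buf ++ rows))
      else pvStream R emit (emit acc ((buf ++ rows).take R)) [] (rows.drop (R - buf.length)) := by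
  intro rows
  induction rows with
  | nil =>
    intro buf acc hb
    have hc : buf.length + ([] : List String).length < R := by simp; omega
    rw [if_pos hc]
    simp [pvStream]
  | cons l rest ih =>
    intro buf acc hb
    simp only [pvStream, List.length_cons]
    by_cases hfull : buf.length + 1 = R
    · rw [if_pos hfull, if_neg (by omega)]
      have h1 : (buf ++ l :: rest).take R = buf ++ [l] := by
        rw [show buf ++ l :: rest = (buf ++ [l]) ++ rest by simp]
        rw [List.take_append_of_le_length (by simp; omega)]
        simp
        omega
      have h2 : (l :: rest).drop (R - buf.length) = rest := by
        rw [show R - buf.length = 1 by omega]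
        rfl
      rw [h1, h2]
    · rw [if_neg hfull, ih (buf ++ [l]) acc (by simp; omega)]
      have e1 : (buf ++ [l]).length = buf.length + 1 := by simp
      rw [e1]
      have e2 : (buf ++ [l]) ++ rest = buf ++ l :: rest := by simp
      rw [e2]
      have e3 : rest.drop (R - (buf.length + 1)) = (l :: rest).drop (R - buf.length) := by
        have : R - buf.length = (R - (buf.length + 1)) + 1 := by omega
        rw [this]
        rfl
      rw [e3]
      congr 2
      omega

theorem pvStream_eq_blocks (R : Nat) (hR : 0 < R) (emit : List String → List String → List String) :
    ∀ (m : Nat) (rows : List String) (acc : List String), rows.length ≤ m →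
    pvStream R emit acc [] rows = (pvBlocks (R - 1) rows).foldl emit acc := by
  intro m
  induction m with
  | zero =>
    intro rows acc hm
    have : rows = [] := List.eq_nil_of_length_eq_zero (by omega)
    subst this
    rw [pvBlocks_nil]
    rfl
  | succ n ih =>
    intro rows acc hm
    by_cases hr : rows = []
    · subst hr; rw [pvBlocks_nil]; rfl
    · rw [pvStream_step R emit rows [] acc (by simpa using hR)]
      have hRr : R - 1 + 1 = R := by omega
      rw [pvBlocks_cons _ _ hr, hRr]
      simp only [List.nil_append, List.length_nil, Nat.zero_add, Nat.sub_zero]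
      by_cases hlen : rows.length < R
      · rw [if_pos hlen]
        have ht : rows.take R = rows := List.take_of_length_le (by omega)
        have hd : rows.drop R = [] := List.drop_eq_nil_of_le (by omega)
        rw [ht, hd, pvBlocks_nil]
        simp [hr]
      · rw [if_neg hlen]
        have hlen2 : (rows.drop R).length ≤ n := by
          rw [List.length_drop]; omega
        rw [ih (rows.drop R) (emit acc (rows.take R)) hlen2]
        rfl

-- A's per-chunk emitter (shared shape of both ports' chunk step, used only in the proofs)
def pvEmit (header : String) (chunks buf : List String) : List String :=
  let chunk := PySem.Str.join "\n" (header :: buf)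
  if PySem.Str.strip chunk ≠ "" then chunks ++ [chunk] else chunks

-- ===== VERDICT (by name: the statement is the Claim_ definition above) =====
theorem chunk_csv_py_spec : Claim_equal_chunk_csv_py := by
  intro text rp hdom hpre
  unfold Spec_chunk_csv_py chunk_csv_py chunk_csv_py_alt
  obtain ⟨header, rows, hL⟩ := List.exists_cons_of_ne_nil (pvSplit_ne_nil text)
  rw [hL]
  simp only [List.isEmpty_cons, List.headD_cons, List.tail_cons, List.length_cons,
    Bool.false_eq_true, if_false]
  by_cases hneg : rp ≤ 0
  · rw [if_pos hneg]
    have hnil : PySem.List.pyRange 1 ((rows.length + 1 : Nat) : Int) rp = [] := by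
      simp [PySem.List.pyRange, show ¬ rp = 0 from hpre, show ¬ (0:Int) < rp by omega]
    rw [hnil]
    simp
  · rw [if_neg hneg]
    have hpos : 0 < rp := by omega
    have hiff : ∀ (x y : List String), x = y →
        (if x.isEmpty then [text] else x) = (if y.isEmpty then [text] else y) := by
      intro x y h; rw [h]
    have hA := pvFoldA rp hpos (pvEmit header) (header :: rows) (header :: rows).length 1 []
      (by omega) (by simp)
    have hB1 := pvFoldB rp (pvEmit header) rows [] []
    have hB2 := pvStream_eq_blocks rp.toNat (by omega) (pvEmit header) rows.length rows []
      (le_refl _)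
    exact hiff _ _ ((hA.trans hB2.symm).trans hB1.symm)
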